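-- pv_equiv track=rewrite | github.com/Liam1809/Python_Practice_Small_Projects | Dictionary_Practice.py | count_first_letter
-- ===== SOURCE A (Python) =====
-- def count_first_letter(names):
--   empty_dict = {}
--   for key, value in names.items():
--     first = key[0]
--     if first not in empty_dict:
--       empty_dict[first] = len(value)
--     else:
--       empty_dict[first] += len(value)
--   return empty_dict
-- ===== SOURCE B (Python) =====
-- def count_first_letter(names):
--     # Staged group-then-reduce without a running accumulator:
--     # (1) collect the distinct first letters in first-seen order,
--     # (2) for each letter, total len(value) with a filtered sum over all items.
--     items = list(names.items())
--     firsts = []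
--     for key, _ in items:
--         if key[0] not in firsts:
--             firsts.append(key[0])
--     return {f: sum(len(v) for k, v in items if k[0] == f) for f in firsts}
-- ===== Notes on version B (the rewrite author's own statement) =====
-- stated objective: alternative
-- what changed: B drops A's fused single-pass dict accumulator: it first collects the distinct first letters in first-seen order, then computes each letter's total by a filtered sum over all items (group pass + per-letter reduce scan).
import Mathlib
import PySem

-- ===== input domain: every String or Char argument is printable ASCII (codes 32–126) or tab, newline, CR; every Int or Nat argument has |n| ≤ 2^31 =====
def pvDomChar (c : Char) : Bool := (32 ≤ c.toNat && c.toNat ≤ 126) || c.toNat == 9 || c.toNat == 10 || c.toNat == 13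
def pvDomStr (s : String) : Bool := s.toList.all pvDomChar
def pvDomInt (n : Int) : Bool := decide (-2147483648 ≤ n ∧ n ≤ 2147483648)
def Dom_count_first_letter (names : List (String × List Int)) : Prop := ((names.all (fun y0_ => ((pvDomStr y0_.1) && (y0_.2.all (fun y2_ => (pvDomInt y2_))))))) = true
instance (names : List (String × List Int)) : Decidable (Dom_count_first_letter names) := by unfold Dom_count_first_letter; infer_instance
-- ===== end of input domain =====

-- B replaces A's fused dict-accumulate with a staged group-then-reduce: a first pass collects
-- the distinct first letters in first-seen order, a second pass sums len(value) per letter by a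
-- filtered scan; same result, different decomposition ('alternative'). Return-value equivalence.


-- ===== PORT A =====
-- A's for-loop: first = key[0] (IndexError → none), then branch on membership:
-- d[first] = len(value)  or  d[first] += len(value)  (the += lookup happens in the
-- contains-branch, so getD's default 0 is never consulted — exact there).
def cflLoopA : List (String × List Int) → PySem.Dict String Int → Option (PySem.Dict String Int)
  | [], d => some d
  | (key, value) :: rest, d =>
    match PySem.Str.pyGet? key 0 with
    | none => none
    | some c =>
      let first := String.mk [c]
      if d.contains first = false then cflLoopA rest (d.insert first (value.length : Int))
      else cflLoopA rest (d.insert first (d.getD first 0 + (value.length : Int)))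

def count_first_letter (names : List (String × List Int)) : List (String × Int) :=
  match cflLoopA names PySem.Dict.empty with
  | some d => d.items
  | none => []

-- ===== PORT B =====
-- key[0] as the one-character string Python slices out (none = IndexError)
def cflFirst? (key : String) : Option String :=
  (PySem.Str.pyGet? key 0).map (fun c => String.mk [c])

-- B's first pass: the distinct first letters, in first-seen order
def cflFirsts : List (String × List Int) → List String → Option (List String)
  | [], acc => some acc
  | (key, _) :: rest, acc =>
    match cflFirst? key with
    | none => none
    | some f => cflFirsts rest (if f ∈ acc then acc else acc ++ [f])

-- B's per-letter reduce: sum(len(v) for k, v in items if k[0] == f)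
-- (the comparison k[0] == f is done through cflFirst?, exact when keys are non-empty)
def cflTotal (f : String) (names : List (String × List Int)) : Int :=
  ((names.filter (fun p => cflFirst? p.1 == some f)).map (fun p => (p.2.length : Int))).sum

def count_first_letter_alt (names : List (String × List Int)) : List (String × Int) :=
  match cflFirsts names [] with
  | some fs => fs.map (fun f => (f, cflTotal f names))
  | none => []

-- ===== PRECONDITION & SPEC =====
-- Pre_ excludes inputs containing an empty-string key, on which A raises IndexError at key[0].
def Pre_count_first_letter (names : List (String × List Int)) : Prop :=
  ∀ p ∈ names, p.1 ≠ ""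
instance (names : List (String × List Int)) : Decidable (Pre_count_first_letter names) := by unfold Pre_count_first_letter; infer_instance

def pvWitness_count_first_letter : (List (String × List Int)) :=
  [("alice", [1, 2]), ("anna", [3]), ("bob", [])]

def Spec_count_first_letter (names : List (String × List Int)) (out : List (String × Int)) : Prop := out = count_first_letter_alt names
instance (names : List (String × List Int)) (out : List (String × Int)) : Decidable (Spec_count_first_letter names out) := by unfold Spec_count_first_letter; infer_instance

-- ===== CLAIM (what is proved, stated in full; the proofs are below) =====
def Claim_equal_count_first_letter : Prop := ∀ (names : List (String × List Int)), Dom_count_first_letter names → Pre_count_first_letter names → Spec_count_first_letter names (count_first_letter names)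

-- ===== LEMMAS AND PROOFS =====

theorem cflTotal_cons (f key : String) (value : List Int) (rest : List (String × List Int)) :
    cflTotal f ((key, value) :: rest)
      = (if cflFirst? key = some f then (value.length : Int) else 0) + cflTotal f rest := by
  simp only [cflTotal, List.filter_cons]
  by_cases h : cflFirst? key = some f
  · simp [h]
  · simp [h]

-- the joint loop invariant: A's accumulator dict is acc (B's letters seen so far) tabulated by g
theorem cfl_main (names : List (String × List Int))
    (hpre : ∀ p ∈ names, p.1 ≠ "")
    (dA : PySem.Dict String Int) (acc : List String) (g : String → Int)
    (hitems : dA.items = acc.map (fun f => (f, g f)))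
    (hnod : acc.Nodup)
    (hzero : ∀ f, f ∉ acc → g f = 0) :
    ∃ dA' fs, cflLoopA names dA = some dA' ∧ cflFirsts names acc = some fs ∧
      dA'.items = fs.map (fun f => (f, g f + cflTotal f names)) := by
  induction names generalizing dA acc g with
  | nil =>
    refine ⟨dA, acc, rfl, rfl, ?_⟩
    rw [hitems]
    exact List.map_congr_left (fun f _ => by simp [cflTotal])
  | cons kv rest ih =>
    obtain ⟨key, value⟩ := kv
    have hk : key ≠ "" := hpre (key, value) (List.mem_cons_self ..)
    have hkl : key.toList ≠ [] := by
      simp only [ne_eq, String.toList_eq_nil_iff]; exact hk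
    obtain ⟨c, hc⟩ : ∃ c, PySem.Str.pyGet? key 0 = some c := by
      cases hx : key.toList with
      | nil => exact absurd hx hkl
      | cons a l => exact ⟨a, by simp [PySem.Str.pyGet?, hx]⟩
    have hfirst : cflFirst? key = some (String.mk [c]) := by
      simp only [cflFirst?, hc, Option.map_some]
    set f := String.mk [c] with hf
    have hkeys : dA.keys = acc := by
      simp [PySem.Dict.keys, hitems, Function.comp_def]
    have hcont : dA.contains f = decide (f ∈ acc) := by
      rw [PySem.Dict.contains_eq_decide_mem_keys, hkeys]
    have hrest : ∀ p ∈ rest, p.1 ≠ "" := fun p hp => hpre p (List.mem_cons_of_mem _ hp)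
    by_cases hmem : f ∈ acc
    · -- seen before: A adds into the existing entry, B's firsts are unchanged
      have hgd : dA.getD f 0 = g f := by
        have hmi : (f, g f) ∈ dA.items := by
          rw [hitems]; exact List.mem_map_of_mem hmem
        exact PySem.Dict.getD_of_mem_items dA hmi (by rw [hkeys]; exact hnod) 0
      have hcont' : dA.contains f = true := by simp [hcont, hmem]
      have hitems' : (dA.insert f (dA.getD f 0 + (value.length : Int))).items
          = acc.map (fun x => (x, (if x = f then g f + (value.length : Int) else g x))) := by
        rw [PySem.Dict.items_insert_of_contains dA _ hcont', hitems, List.map_map]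
        refine List.map_congr_left (fun x _ => ?_)
        by_cases hx : x = f
        · simp [hx, hgd]
        · simp [hx]
      obtain ⟨dA', fs, hA, hB, hR⟩ := ih hrest _ acc
        (fun x => if x = f then g f + (value.length : Int) else g x) hitems' hnod
        (fun x hx => by
          have : x ≠ f := fun h => hx (h ▸ hmem)
          simp [this, hzero x hx])
      refine ⟨dA', fs, ?_, ?_, ?_⟩
      · simp only [cflLoopA, hc, hcont', ← hf]
        simpa using hA
      · simp only [cflFirsts, hfirst, if_pos hmem]
        exact hB
      · rw [hR]
        refine List.map_congr_left (fun x _ => ?_)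
        rw [cflTotal_cons, hfirst]
        by_cases hx : x = f
        · simp [hx]; ring
        · simp [hx, Ne.symm hx]
    · -- new letter: A appends a fresh entry, B appends f to firsts
      have hg0 : g f = 0 := hzero f hmem
      have hcont' : dA.contains f = false := by simp [hcont, hmem]
      have hitems' : (dA.insert f (value.length : Int)).items
          = (acc ++ [f]).map (fun x => (x, (if x = f then (value.length : Int) else g x))) := by
        rw [PySem.Dict.items_insert_of_not_contains dA _ hcont', hitems, List.map_append]
        congr 1
        · exact List.map_congr_left (fun x hx => by
            have : x ≠ f := fun h => hmem (h ▸ hx)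
            simp [this])
        · simp
      obtain ⟨dA', fs, hA, hB, hR⟩ := ih hrest _ (acc ++ [f])
        (fun x => if x = f then (value.length : Int) else g x) hitems'
        (by refine List.Nodup.append hnod (List.nodup_singleton f) ?_; simp [List.disjoint_singleton, hmem])
        (fun x hx => by
          have hx1 : x ∉ acc := fun h => hx (List.mem_append_left _ h)
          have hx2 : x ≠ f := fun h => hx (by simp [h])
          simp [hx2, hzero x hx1])
      refine ⟨dA', fs, ?_, ?_, ?_⟩
      · simp only [cflLoopA, hc, hcont', ← hf]
        simpa using hA
      · simp only [cflFirsts, hfirst, if_neg hmem]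
        exact hB
      · rw [hR]
        refine List.map_congr_left (fun x _ => ?_)
        rw [cflTotal_cons, hfirst]
        by_cases hx : x = f
        · simp [hx, hg0]
        · simp [hx, Ne.symm hx]

-- ===== VERDICT (by name: the statement is the Claim_ definition above) =====
theorem count_first_letter_spec : Claim_equal_count_first_letter := by
  intro names _ hpre
  unfold Spec_count_first_letter count_first_letter count_first_letter_alt
  obtain ⟨dA', fs, hA, hB, hR⟩ := cfl_main names hpre PySem.Dict.empty [] (fun _ => 0)
    rfl List.nodup_nil (fun _ _ => rfl)
  simp only [hA, hB, hR]
  exact List.map_congr_left (fun f _ => by simp)
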